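-- pv_equiv track=rewrite | github.com/Kim-Ju-won/Algorithm_Practice | 프로그래머스/Level 0. 코딩입문/Day 13 문자열, 배열, 사칙연산, 수학, 조건문/1. 컨트롤 제트.py | solution
-- ===== SOURCE A (Python) =====
-- def solution(s):
--     s = s.split()
--     new = []
--     for i in range(len(s)) :
--         if s[i] == 'Z':
--             if len(new) != 0 :
--                 new.pop()
--         else :
--             new.append(int(s[i]))
--     answer = sum(new)
--     return answer
-- ===== SOURCE B (Python) =====
-- def solution(s):
--     # Backward scan with a skip counter instead of a forward stack:
--     # a 'Z' cancels the nearest earlier number, so going right-to-left each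
--     # 'Z' just marks one upcoming number as skipped.
--     skip = 0
--     total = 0
--     for t in reversed(s.split()):
--         if t == 'Z':
--             skip += 1
--         elif skip > 0:
--             skip -= 1
--         else:
--             total += int(t)
--     return total
-- ===== Notes on version B (the rewrite author's own statement) =====
-- stated objective: alternative
-- what changed: Replaces the forward stack (append/pop then sum) by a single backward scan over the reversed token list that keeps only an integer skip-counter and a running total, so no list of numbers is ever built.
import Mathlib
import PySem

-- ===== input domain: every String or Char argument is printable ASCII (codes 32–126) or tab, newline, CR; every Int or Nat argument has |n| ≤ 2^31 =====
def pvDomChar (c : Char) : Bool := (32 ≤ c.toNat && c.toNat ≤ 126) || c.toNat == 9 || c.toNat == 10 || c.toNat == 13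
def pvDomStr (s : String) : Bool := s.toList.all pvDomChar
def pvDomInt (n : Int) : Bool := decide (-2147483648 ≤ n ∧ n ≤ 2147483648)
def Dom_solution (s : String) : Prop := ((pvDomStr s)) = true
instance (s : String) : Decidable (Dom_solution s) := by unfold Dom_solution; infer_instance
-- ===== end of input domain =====

-- B replaces A's forward stack (append/pop, then sum) by one backward scan of the
-- reversed token list with a skip-counter and a running total (alternative decomposition).


-- ===== PORT A =====
-- A's loop body: 'Z' pops the stack (if nonempty), otherwise push int(token).
-- int(t) is (PySem.Int.ofStr? t).getD 0; Pre_solution excludes the none case (ValueError).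
def solStepA (new : List Int) (t : String) : List Int :=
  if t == "Z" then
    if new.length ≠ 0 then
      match PySem.List.pop? new with
      | some r => r.2
      | none => new
    else new
  else new ++ [(PySem.Int.ofStr? t).getD 0]

def solution (s : String) : Int :=
  ((PySem.Str.split₀ s).foldl solStepA []).sum

-- ===== PORT B =====
-- B's loop body over the reversed token list; state = (skip counter, running total).
def solStepB (st : Int × Int) (t : String) : Int × Int :=
  if t == "Z" then (st.1 + 1, st.2)
  else if st.1 > 0 then (st.1 - 1, st.2)
  else (st.1, st.2 + (PySem.Int.ofStr? t).getD 0)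

def solution_alt (s : String) : Int :=
  ((PySem.Str.split₀ s).reverse.foldl solStepB (0, 0)).2

-- ===== PRECONDITION & SPEC =====
-- Pre_ excludes exactly the inputs on which Python A raises ValueError:
-- a whitespace-separated token that is neither 'Z' nor a valid int literal.
def Pre_solution (s : String) : Prop :=
  ∀ t ∈ PySem.Str.split₀ s, t = "Z" ∨ (PySem.Int.ofStr? t).isSome
instance (s : String) : Decidable (Pre_solution s) := by unfold Pre_solution; infer_instance
def pvWitness_solution : String := "1 2 Z 3"

def Spec_solution (s : String) (out : Int) : Prop := out = solution_alt s
instance (s : String) (out : Int) : Decidable (Spec_solution s out) := by unfold Spec_solution; infer_instance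

-- ===== CLAIM (what is proved, stated in full; the proofs are below) =====
def Claim_equal_solution : Prop := ∀ (s : String), Dom_solution s → Pre_solution s → Spec_solution s (solution s)

-- ===== LEMMAS AND PROOFS =====

-- Invariant: running B's scan over ts.reverse starting with skip pending cancellations
-- computes c plus the sum of A's stack for ts with its last skip elements removed.
lemma solKey (ts : List String) : ∀ (skip c : Int), 0 ≤ skip →
    (ts.reverse.foldl solStepB (skip, c)).2
      = c + (((ts.foldl solStepA []).take ((ts.foldl solStepA []).length - skip.toNat)).sum) := by
  induction ts using List.reverseRecOn with
  | nil => intro skip c _; simp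
  | append_singleton us t ih =>
    intro skip c hskip
    rw [List.reverse_append, List.reverse_singleton, List.singleton_append,
        List.foldl_cons, List.foldl_append]
    simp only [List.foldl_cons, List.foldl_nil]
    set U := us.foldl solStepA [] with hU
    by_cases hz : (t == "Z") = true
    · -- t = 'Z': skip counter goes up; A pops the stack.
      simp only [solStepA, solStepB, hz, if_pos]
      rw [ih (skip + 1) c (by omega)]
      rcases List.eq_nil_or_concat U with h | ⟨V, v, h⟩
      · simp [h]
      · rw [List.concat_eq_append] at h
        rw [h, PySem.List.pop?_last]
        simp only [List.length_append, List.length_cons, List.length_nil, ne_eq]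
        rw [if_pos (by omega)]
        have h1 : V.length + 1 - (skip + 1).toNat = V.length - skip.toNat := by omega
        have h2 : V.length - skip.toNat ≤ V.length := by omega
        rw [h1, List.take_append_of_le_length h2]
    · have hz' : (t == "Z") = false := by simpa using hz
      simp only [solStepA, solStepB, hz', Bool.false_eq_true, if_false]
      by_cases hs : skip > 0
      · -- a later 'Z' cancels this number; A's pushed value is dropped by take.
        rw [if_pos hs, ih (skip - 1) c (by omega)]
        have h1 : (U ++ [(PySem.Int.ofStr? t).getD 0]).length - skip.toNat
            = U.length - (skip - 1).toNat := by
          simp only [List.length_append, List.length_cons, List.length_nil]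
          omega
        have h2 : U.length - (skip - 1).toNat ≤ U.length := by omega
        rw [h1, List.take_append_of_le_length h2]
      · -- no pending cancellation: the number counts; A's take keeps the whole stack.
        have hs0 : skip = 0 := le_antisymm (by omega) hskip
        rw [if_neg hs, ih skip (c + (PySem.Int.ofStr? t).getD 0) hskip, hs0]
        simp only [Int.toNat_zero, Nat.sub_zero]
        rw [List.take_of_length_le (le_refl _), List.take_of_length_le (by simp)]
        simp [List.sum_append]
        ring

-- ===== VERDICT (by name: the statement is the Claim_ definition above) =====
theorem solution_spec : Claim_equal_solution := by
  intro s _ _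
  unfold Spec_solution solution solution_alt
  rw [solKey (PySem.Str.split₀ s) 0 0 (le_refl 0)]
  simp
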